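-- pv_equiv track=rewrite | github.com/Liam-1992/Brainrot_Shorts | app/virality_score.py | _problem_intervals
-- ===== SOURCE A (Python) =====
-- from typing import List, Tuple
--
-- def _problem_intervals(beat_density: List[int], wps: List[int]) -> List[str]:
--     problems = []
--     slow = _find_ranges([v < 1 for v in beat_density])
--     dense = _find_ranges([v > 6 for v in wps])
--     for start, end in slow:
--         if end - start >= 3:
--             problems.append(f"{start}-{end}s too slow")
--     for start, end in dense:
--         if end - start >= 2:
--             problems.append(f"{start}-{end}s too dense")
--     return problems
--
-- def _find_ranges(flags: List[bool]) -> List[Tuple[int, int]]: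
--     ranges = []
--     start = None
--     for idx, flag in enumerate(flags):
--         if flag and start is None:
--             start = idx
--         if not flag and start is not None:
--             ranges.append((start, idx))
--             start = None
--     if start is not None:
--         ranges.append((start, len(flags)))
--     return ranges
-- ===== SOURCE B (Python) =====
-- from typing import List
--
--
-- def _runs(flags):
--     prev = [False] + flags[:-1]
--     starts = [i for i, (f, p) in enumerate(zip(flags, prev)) if f and not p]
--     ends = [i for i, (f, p) in enumerate(zip(flags, prev)) if p and not f]
--     if flags and flags[-1]:
--         ends.append(len(flags))
--     return list(zip(starts, ends))
--
--
-- def _problem_intervals(beat_density: List[int], wps: List[int]) -> List[str]: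
--     slow = [f"{s}-{e}s too slow" for s, e in _runs([v < 1 for v in beat_density]) if e - s >= 3]
--     dense = [f"{s}-{e}s too dense" for s, e in _runs([v > 6 for v in wps]) if e - s >= 2]
--     return slow + dense
-- ===== Notes on version B (the rewrite author's own statement) =====
-- stated objective: alternative
-- what changed: Replaces A's stateful Option-sentinel scan that builds (start,end) ranges by a stateless boundary-detection: zip each flag list with its one-shifted copy, collect run-start indices (true after false) and run-end indices (false after true, plus len if the list ends true) as two index lists, and zip them into runs before filtering/formatting.
import Mathlib
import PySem

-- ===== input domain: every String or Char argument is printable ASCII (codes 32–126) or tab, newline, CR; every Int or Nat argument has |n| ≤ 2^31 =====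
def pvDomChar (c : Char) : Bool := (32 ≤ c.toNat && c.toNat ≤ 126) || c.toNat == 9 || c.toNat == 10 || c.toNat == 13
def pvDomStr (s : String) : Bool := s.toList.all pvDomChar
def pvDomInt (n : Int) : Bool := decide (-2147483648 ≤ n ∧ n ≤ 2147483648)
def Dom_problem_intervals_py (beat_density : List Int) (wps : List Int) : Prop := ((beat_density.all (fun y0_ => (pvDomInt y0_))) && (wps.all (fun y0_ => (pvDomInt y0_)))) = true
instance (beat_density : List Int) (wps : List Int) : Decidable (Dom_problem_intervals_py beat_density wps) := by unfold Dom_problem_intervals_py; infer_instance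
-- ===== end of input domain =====

-- B replaces A's stateful Option-sentinel range scan by stateless boundary detection:
-- zip each flag list with its shifted copy, collect start/end boundary indices and zip them (objective: alternative).

-- ===== PORT A =====
-- loop body of _find_ranges: Option-sentinel state (ranges so far, open start)
def pvStepA (st : List (Int × Int) × Option Int) (p : Int × Bool) : List (Int × Int) × Option Int :=
  let start := if p.2 && st.2.isNone then some p.1 else st.2
  match p.2, start with
  | false, some s => (st.1 ++ [(s, p.1)], none)
  | _, _ => (st.1, start)

-- the 'if start is not None' close after the loop
def pvCloseA (n : Int) (st : List (Int × Int) × Option Int) : List (Int × Int) :=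
  match st.2 with
  | some s => st.1 ++ [(s, n)]
  | none => st.1

def pvFindRanges (flags : List Bool) : List (Int × Int) :=
  pvCloseA (flags.length : Int) ((PySem.List.enumerate flags 0).foldl pvStepA ([], none))

def problem_intervals_py (beat_density : List Int) (wps : List Int) : List String :=
  let slow := pvFindRanges (beat_density.map (fun v => decide (v < 1)))
  let dense := pvFindRanges (wps.map (fun v => decide (v > 6)))
  let problems := slow.foldl
    (fun ps (se : Int × Int) =>
      if se.2 - se.1 ≥ 3 then ps ++ [PySem.Int.toStr se.1 ++ "-" ++ PySem.Int.toStr se.2 ++ "s too slow"] else ps)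
    ([] : List String)
  dense.foldl
    (fun ps (se : Int × Int) =>
      if se.2 - se.1 ≥ 2 then ps ++ [PySem.Int.toStr se.1 ++ "-" ++ PySem.Int.toStr se.2 ++ "s too dense"] else ps)
    problems

-- ===== PORT B =====
-- _runs: prev = [False] + flags[:-1]; starts/ends by boundary comparison; zip
def pvRuns (flags : List Bool) : List (Int × Int) :=
  let prev := false :: PySem.List.slice flags none (some (-1))
  let starts := ((PySem.List.enumerate (flags.zip prev) 0).filter
      (fun x => x.2.1 && !x.2.2)).map (·.1)
  let ends0 := ((PySem.List.enumerate (flags.zip prev) 0).filter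
      (fun x => x.2.2 && !x.2.1)).map (·.1)
  -- 'if flags and flags[-1]: ends.append(len(flags))'
  let ends := if PySem.List.pyGet? flags (-1) = some true then
      ends0 ++ [(flags.length : Int)] else ends0
  starts.zip ends

def problem_intervals_py_alt (beat_density : List Int) (wps : List Int) : List String :=
  let slow := ((pvRuns (beat_density.map (fun v => decide (v < 1)))).filter
      (fun se => decide (se.2 - se.1 ≥ 3))).map
      (fun se => PySem.Int.toStr se.1 ++ "-" ++ PySem.Int.toStr se.2 ++ "s too slow")
  let dense := ((pvRuns (wps.map (fun v => decide (v > 6)))).filter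
      (fun se => decide (se.2 - se.1 ≥ 2))).map
      (fun se => PySem.Int.toStr se.1 ++ "-" ++ PySem.Int.toStr se.2 ++ "s too dense")
  slow ++ dense

-- ===== PRECONDITION & SPEC =====
def Spec_problem_intervals_py (beat_density : List Int) (wps : List Int) (out : List String) : Prop := out = problem_intervals_py_alt beat_density wps
instance (beat_density : List Int) (wps : List Int) (out : List String) : Decidable (Spec_problem_intervals_py beat_density wps out) := by unfold Spec_problem_intervals_py; infer_instance

-- ===== CLAIM (what is proved, stated in full; the proofs are below) =====
def Claim_equal_problem_intervals_py : Prop := ∀ (beat_density : List Int) (wps : List Int), Dom_problem_intervals_py beat_density wps → Spec_problem_intervals_py beat_density wps (problem_intervals_py beat_density wps)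

-- ===== LEMMAS AND PROOFS =====

-- common spec: the maximal runs of a boolean list, as (start, end) pairs, given an offset and an open run start
def pvG : List Bool → Int → Option Int → List (Int × Int)
  | [], _, none => []
  | [], n, some s => [(s, n)]
  | true :: fs, n, none => pvG fs (n + 1) (some n)
  | true :: fs, n, some s => pvG fs (n + 1) (some s)
  | false :: fs, n, none => pvG fs (n + 1) none
  | false :: fs, n, some s => (s, n) :: pvG fs (n + 1) none

lemma findRanges_aux (fs : List Bool) : ∀ (n : Int) (ranges : List (Int × Int)) (start : Option Int),
    pvCloseA (n + fs.length) ((PySem.List.enumerate fs n).foldl pvStepA (ranges, start))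
      = ranges ++ pvG fs n start := by
  induction fs with
  | nil =>
    intro n ranges start
    cases start <;> simp [PySem.List.enumerate_nil, pvCloseA, pvG]
  | cons f fs ih =>
    intro n ranges start
    rw [PySem.List.enumerate_cons, List.foldl_cons]
    have hlen : n + ((f :: fs).length : Int) = (n + 1) + (fs.length : Int) := by
      simp [List.length_cons]; omega
    rw [hlen]
    cases f <;> cases start
    · have h : pvStepA (ranges, none) (n, false) = (ranges, none) := rfl
      rw [h, ih]; rfl
    · rename_i s
      have h : pvStepA (ranges, some s) (n, false) = (ranges ++ [(s, n)], none) := rfl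
      rw [h, ih]; simp [pvG]
    · have h : pvStepA (ranges, none) (n, true) = (ranges, some n) := rfl
      rw [h, ih]; rfl
    · rename_i s
      have h : pvStepA (ranges, some s) (n, true) = (ranges, some s) := rfl
      rw [h, ih]; rfl

lemma findRanges_eq_g (flags : List Bool) :
    pvFindRanges flags = pvG flags 0 none := by
  have h := findRanges_aux flags 0 [] none
  rw [zero_add] at h
  simpa [pvFindRanges] using h

-- boundary-index lists of B, in structural form
def pvS : List Bool → Int → Bool → List Int
  | [], _, _ => []
  | f :: fs, n, p => if f && !p then n :: pvS fs (n + 1) f else pvS fs (n + 1) f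

def pvE : List Bool → Int → Bool → List Int
  | [], n, p => if p then [n] else []
  | f :: fs, n, p => if p && !f then n :: pvE fs (n + 1) f else pvE fs (n + 1) f

lemma starts_aux (fs : List Bool) : ∀ (n : Int) (p : Bool),
    (((PySem.List.enumerate (fs.zip (p :: fs.dropLast)) n).filter
        (fun x => x.2.1 && !x.2.2)).map (·.1)) = pvS fs n p := by
  induction fs with
  | nil => intro n p; simp [PySem.List.enumerate_nil, pvS]
  | cons f fs ih =>
    intro n p
    cases fs with
    | nil =>
      cases f <;> cases p <;>
        simp [PySem.List.enumerate_cons, PySem.List.enumerate_nil, pvS]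
    | cons g gs =>
      have hz : (f :: g :: gs).zip (p :: (f :: g :: gs).dropLast)
          = (f, p) :: (g :: gs).zip (f :: (g :: gs).dropLast) := by
        simp [List.dropLast_cons₂]
      rw [hz, PySem.List.enumerate_cons, List.filter_cons]
      cases hf : (f && !p)
      · simp only [Bool.false_eq_true, if_false]
        rw [ih]
        simp [pvS, hf]
      · simp only [if_true, List.map_cons]
        rw [ih]
        simp [pvS, hf]

lemma ends_aux (fs : List Bool) : ∀ (n : Int) (p : Bool),
    ((((PySem.List.enumerate (fs.zip (p :: fs.dropLast)) n).filter
        (fun x => x.2.2 && !x.2.1)).map (·.1))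
      ++ (if fs.getLast? = some true ∨ (fs = [] ∧ p) then [n + fs.length] else []))
      = pvE fs n p := by
  induction fs with
  | nil =>
    intro n p
    cases p <;> simp [PySem.List.enumerate_nil, pvE]
  | cons f fs ih =>
    intro n p
    have hlast : (f :: fs).getLast? = some true ∨ (f :: fs = [] ∧ p)
        ↔ (fs.getLast? = some true ∨ (fs = [] ∧ f)) := by
      cases fs with
      | nil => cases f <;> simp
      | cons g gs => simp [List.getLast?_cons_cons]
    have hlen : n + ((f :: fs).length : Int) = (n + 1) + (fs.length : Int) := by
      simp [List.length_cons]; omega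
    cases fs with
    | nil =>
      cases f <;> cases p <;>
        simp [PySem.List.enumerate_cons, PySem.List.enumerate_nil, pvE]
    | cons g gs =>
      have hz : (f :: g :: gs).zip (p :: (f :: g :: gs).dropLast)
          = (f, p) :: (g :: gs).zip (f :: (g :: gs).dropLast) := by
        simp [List.dropLast_cons₂]
      rw [hz, PySem.List.enumerate_cons, List.filter_cons]
      cases hf : (p && !f)
      · simp only [Bool.false_eq_true, if_false]
        rw [show (if (f :: g :: gs).getLast? = some true ∨ (f :: g :: gs = [] ∧ p)
              then [n + ((f :: g :: gs).length : Int)] else [])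
            = (if (g :: gs).getLast? = some true ∨ (g :: gs = [] ∧ f)
              then [(n + 1) + ((g :: gs).length : Int)] else []) by
          rw [hlen]; simp only [hlast]]
        rw [ih]
        simp [pvE, hf]
      · simp only [if_true, List.map_cons]
        rw [List.cons_append,
          show (if (f :: g :: gs).getLast? = some true ∨ (f :: g :: gs = [] ∧ p)
              then [n + ((f :: g :: gs).length : Int)] else [])
            = (if (g :: gs).getLast? = some true ∨ (g :: gs = [] ∧ f)
              then [(n + 1) + ((g :: gs).length : Int)] else []) by
          rw [hlen]; simp only [hlast]]
        rw [ih]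
        simp [pvE, hf]

-- zipping the boundary lists yields exactly the maximal runs
lemma zip_SE (fs : List Bool) : ∀ (n : Int),
    ((pvS fs n false).zip (pvE fs n false) = pvG fs n none)
    ∧ (∀ s : Int, (s :: pvS fs n true).zip (pvE fs n true) = pvG fs n (some s)) := by
  induction fs with
  | nil => intro n; exact ⟨by simp [pvS, pvE, pvG], fun s => by simp [pvS, pvE, pvG]⟩
  | cons f fs ih =>
    intro n
    cases f
    · refine ⟨?_, fun s => ?_⟩
      · simpa [pvS, pvE, pvG] using (ih (n + 1)).1
      · simpa [pvS, pvE, pvG] using congrArg (List.cons (s, n)) (ih (n + 1)).1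
    · refine ⟨?_, fun s => ?_⟩
      · simpa [pvS, pvE, pvG] using (ih (n + 1)).2 n
      · simpa [pvS, pvE, pvG] using (ih (n + 1)).2 s

lemma runs_eq_g (flags : List Bool) : pvRuns flags = pvG flags 0 none := by
  have hends : (if PySem.List.pyGet? flags (-1) = some true then
        ((((PySem.List.enumerate (flags.zip (false :: flags.dropLast)) 0).filter
          (fun x => x.2.2 && !x.2.1)).map (·.1))) ++ [(flags.length : Int)]
      else (((PySem.List.enumerate (flags.zip (false :: flags.dropLast)) 0).filter
          (fun x => x.2.2 && !x.2.1)).map (·.1))) = pvE flags 0 false := by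
    rw [← ends_aux flags 0 false]
    rw [PySem.List.pyGet?_neg_one]
    by_cases h : flags.getLast? = some true
    · simp [h]
    · simp [h]
  unfold pvRuns
  simp only [PySem.List.slice_to_neg_one]
  rw [starts_aux flags 0 false, hends]
  exact (zip_SE flags 0).1

-- ===== VERDICT (by name: the statement is the Claim_ definition above) =====
theorem problem_intervals_py_spec : Claim_equal_problem_intervals_py := by
  intro beat_density wps _
  show problem_intervals_py beat_density wps = problem_intervals_py_alt beat_density wps
  simp only [problem_intervals_py, problem_intervals_py_alt]
  rw [findRanges_eq_g, findRanges_eq_g, runs_eq_g, runs_eq_g,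
      PySem.List.foldl_append_ite (p := fun se : Int × Int => se.2 - se.1 ≥ 3),
      PySem.List.foldl_append_ite (p := fun se : Int × Int => se.2 - se.1 ≥ 2)]
  simp
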